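-- pv_equiv track=rewrite | github.com/devgxrg/RoadVisionChatbotBackendV2 | app/modules/bidsynopsis/synopsis_service.py | _create_contextual_sentence
-- ===== SOURCE A (Python) =====
-- def _create_contextual_sentence(label: str, value: str) -> str:
--     """Create a meaningful contextual sentence from label and value with rich context."""
--
--     # If value is already a complete sentence, use it
--     if len(value) > 50 and any(char in value for char in '.!?'):
--         return value
--
--     # If value is very long description, use as-is
--     if len(value) > 100:
--         return value
--
--     # Handle "Refer document" cases specially
--     if 'refer' in value.lower() and 'document' in value.lower():
--         return f"For {label.lower()}, bidders must refer to the tender document for specific details and requirements"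
--
--     label_lower = label.lower()
--
--     # Create rich natural sentences based on label type
--     if 'amount' in label_lower or 'value' in label_lower or 'cost' in label_lower:
--         if 'emd' in label_lower:
--             return f"Earnest Money Deposit (EMD) required for participating in this tender is {value}"
--         elif 'contract' in label_lower:
--             return f"Total contract value for the execution of this project is {value}"
--         elif 'document' in label_lower or 'fee' in label_lower:
--             return f"Document fees that must be paid to obtain tender documents amount to {value}"
--         elif 'tender' in label_lower:
--             return f"Total estimated tender value for this construction/procurement project is {value}"
--         else:
--             return f"The {label.lower()} specified in the tender documents is {value}"
--
--     elif 'emd' in label_lower and 'amount' not in label_lower: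
--         return f"Earnest Money Deposit (EMD) requirement for this tender is {value}"
--
--     elif 'document' in label_lower and 'fee' in label_lower:
--         return f"Fees required for purchasing tender documents and specifications amount to {value}"
--
--     elif 'date' in label_lower or 'deadline' in label_lower:
--         if 'due' in label_lower:
--             return f"Final deadline for submission of completed tender bids is {value}"
--         else:
--             return f"Important {label.lower()} specified in the tender schedule is {value}"
--
--     elif 'authority' in label_lower or 'organization' in label_lower:
--         return f"The {label.lower()} responsible for issuing and managing this tender is {value}"
--
--     elif 'experience' in label_lower:
--         return f"Experience qualification required from bidders: {value}"
--
--     elif 'financial' in label_lower and 'requirement' in label_lower: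
--         return f"Financial eligibility criteria that bidders must meet: {value}"
--
--     elif 'technical' in label_lower and 'requirement' in label_lower:
--         return f"Technical qualification and capability requirements: {value}"
--
--     elif 'type' in label_lower:
--         return f"This procurement is categorized as a {value} type project"
--
--     elif 'name' in label_lower or 'title' in label_lower:
--         if 'project' in label_lower:
--             return f"Official project name/title: {value}"
--         else:
--             return f"The project is officially named: {value}"
--
--     elif any(word in label_lower for word in ['construction', 'development', 'work']):
--         return f"Scope of construction/development work includes: {value}"
--
--     elif 'state' in label_lower:
--         return f"This project is located in the state of {value}"
--
--     elif 'city' in label_lower: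
--         return f"Project location/implementation site is in {value}"
--
--     else:
--         # Enhanced generic format for other cases
--         return f"Tender specification for {label.lower()}: {value}"
--
--     return f"{label}: {value}"
-- ===== SOURCE B (Python) =====
-- # Flattened declarative rule table: one pass builds the set of keywords present in the
-- # lowered label; a flat list of (all-of-groups, none-of, template-pieces) rows replaces
-- # A's nested elif chain, and templates are data rendered by joining pieces.
--
-- _KEYWORDS = ("amount", "value", "cost", "emd", "contract", "document", "fee", "tender",
--              "date", "deadline", "due", "authority", "organization", "experience",
--              "financial", "requirement", "technical", "type", "name", "title", "project",
--              "construction", "development", "work", "state", "city")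
--
-- _L = object()   # placeholder: lowered label
-- _V = object()   # placeholder: value
--
-- _RULES = [
--     ([["amount", "value", "cost"], ["emd"]], [],
--      ["Earnest Money Deposit (EMD) required for participating in this tender is ", _V]),
--     ([["amount", "value", "cost"], ["contract"]], [],
--      ["Total contract value for the execution of this project is ", _V]),
--     ([["amount", "value", "cost"], ["document", "fee"]], [],
--      ["Document fees that must be paid to obtain tender documents amount to ", _V]),
--     ([["amount", "value", "cost"], ["tender"]], [],
--      ["Total estimated tender value for this construction/procurement project is ", _V]),
--     ([["amount", "value", "cost"]], [],
--      ["The ", _L, " specified in the tender documents is ", _V]),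
--     ([["emd"]], ["amount"],
--      ["Earnest Money Deposit (EMD) requirement for this tender is ", _V]),
--     ([["document"], ["fee"]], [],
--      ["Fees required for purchasing tender documents and specifications amount to ", _V]),
--     ([["date", "deadline"], ["due"]], [],
--      ["Final deadline for submission of completed tender bids is ", _V]),
--     ([["date", "deadline"]], [],
--      ["Important ", _L, " specified in the tender schedule is ", _V]),
--     ([["authority", "organization"]], [],
--      ["The ", _L, " responsible for issuing and managing this tender is ", _V]),
--     ([["experience"]], [],
--      ["Experience qualification required from bidders: ", _V]),
--     ([["financial"], ["requirement"]], [],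
--      ["Financial eligibility criteria that bidders must meet: ", _V]),
--     ([["technical"], ["requirement"]], [],
--      ["Technical qualification and capability requirements: ", _V]),
--     ([["type"]], [],
--      ["This procurement is categorized as a ", _V, " type project"]),
--     ([["name", "title"], ["project"]], [],
--      ["Official project name/title: ", _V]),
--     ([["name", "title"]], [],
--      ["The project is officially named: ", _V]),
--     ([["construction", "development", "work"]], [],
--      ["Scope of construction/development work includes: ", _V]),
--     ([["state"]], [],
--      ["This project is located in the state of ", _V]),
--     ([["city"]], [],
--      ["Project location/implementation site is in ", _V]),
-- ]
--
-- _FALLBACK = ["Tender specification for ", _L, ": ", _V]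
--
--
-- def _create_contextual_sentence(label: str, value: str) -> str:
--     if len(value) > 50 and any(c in value for c in '.!?'):
--         return value
--     if len(value) > 100:
--         return value
--     vl = value.lower()
--     if 'refer' in vl and 'document' in vl:
--         return f"For {label.lower()}, bidders must refer to the tender document for specific details and requirements"
--
--     ll = label.lower()
--     present = frozenset(w for w in _KEYWORDS if w in ll)
--
--     def render(pieces):
--         return ''.join(ll if p is _L else value if p is _V else p for p in pieces)
--
--     for groups, none_of, template in _RULES:
--         if all(any(w in present for w in g) for g in groups) \
--                 and all(w not in present for w in none_of):
--             return render(template)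
--     return render(_FALLBACK)
-- ===== Notes on version B (the rewrite author's own statement) =====
-- stated objective: alternative
-- what changed: A's nested elif chain (with sub-branches inside the amount, date and name cases) is flattened into a declarative table of 19 (all-of-groups, none-of, template-pieces) rows matched against a keyword set precomputed in one pass over the lowered label; templates are data (literal/label/value pieces) rendered by joining, instead of hard-coded f-strings in code branches.
import Mathlib
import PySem

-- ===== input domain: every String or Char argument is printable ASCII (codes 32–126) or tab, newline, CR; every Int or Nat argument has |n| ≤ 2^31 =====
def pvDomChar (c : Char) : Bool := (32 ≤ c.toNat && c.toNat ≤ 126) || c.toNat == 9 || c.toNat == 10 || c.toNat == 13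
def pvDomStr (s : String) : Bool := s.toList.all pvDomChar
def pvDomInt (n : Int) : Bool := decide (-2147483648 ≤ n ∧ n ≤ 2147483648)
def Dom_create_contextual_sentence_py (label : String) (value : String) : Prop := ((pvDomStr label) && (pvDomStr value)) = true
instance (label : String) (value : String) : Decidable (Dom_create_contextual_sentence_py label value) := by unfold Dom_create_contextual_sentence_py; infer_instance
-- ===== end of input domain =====

-- B flattens A's nested elif chain into a declarative table of (all-of-groups, none-of, template-pieces)
-- rows matched against a precomputed keyword set, with templates rendered from data (objective: alternative).

-- ===== PORT A =====
-- literal transliteration of A's if/elif chain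
def create_contextual_sentence_py (label : String) (value : String) : String :=
  if (decide (PySem.Str.len value > 50) && ".!?".toList.any (fun c => value.toList.contains c)) = true then value
  else if PySem.Str.len value > 100 then value
  else if (PySem.Str.isIn "refer" (PySem.Str.lower value) && PySem.Str.isIn "document" (PySem.Str.lower value)) = true then
    "For " ++ PySem.Str.lower label ++ ", bidders must refer to the tender document for specific details and requirements"
  else
    let ll := PySem.Str.lower label
    if (PySem.Str.isIn "amount" ll || PySem.Str.isIn "value" ll || PySem.Str.isIn "cost" ll) = true then
      if PySem.Str.isIn "emd" ll = true then
        "Earnest Money Deposit (EMD) required for participating in this tender is " ++ value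
      else if PySem.Str.isIn "contract" ll = true then
        "Total contract value for the execution of this project is " ++ value
      else if (PySem.Str.isIn "document" ll || PySem.Str.isIn "fee" ll) = true then
        "Document fees that must be paid to obtain tender documents amount to " ++ value
      else if PySem.Str.isIn "tender" ll = true then
        "Total estimated tender value for this construction/procurement project is " ++ value
      else
        "The " ++ PySem.Str.lower label ++ " specified in the tender documents is " ++ value
    else if (PySem.Str.isIn "emd" ll && !PySem.Str.isIn "amount" ll) = true then
      "Earnest Money Deposit (EMD) requirement for this tender is " ++ value
    else if (PySem.Str.isIn "document" ll && PySem.Str.isIn "fee" ll) = true then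
      "Fees required for purchasing tender documents and specifications amount to " ++ value
    else if (PySem.Str.isIn "date" ll || PySem.Str.isIn "deadline" ll) = true then
      if PySem.Str.isIn "due" ll = true then
        "Final deadline for submission of completed tender bids is " ++ value
      else
        "Important " ++ PySem.Str.lower label ++ " specified in the tender schedule is " ++ value
    else if (PySem.Str.isIn "authority" ll || PySem.Str.isIn "organization" ll) = true then
      "The " ++ PySem.Str.lower label ++ " responsible for issuing and managing this tender is " ++ value
    else if PySem.Str.isIn "experience" ll = true then
      "Experience qualification required from bidders: " ++ value
    else if (PySem.Str.isIn "financial" ll && PySem.Str.isIn "requirement" ll) = true then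
      "Financial eligibility criteria that bidders must meet: " ++ value
    else if (PySem.Str.isIn "technical" ll && PySem.Str.isIn "requirement" ll) = true then
      "Technical qualification and capability requirements: " ++ value
    else if PySem.Str.isIn "type" ll = true then
      "This procurement is categorized as a " ++ value ++ " type project"
    else if (PySem.Str.isIn "name" ll || PySem.Str.isIn "title" ll) = true then
      if PySem.Str.isIn "project" ll = true then
        "Official project name/title: " ++ value
      else
        "The project is officially named: " ++ value
    else if (["construction", "development", "work"].any (fun w => PySem.Str.isIn w ll)) = true then
      "Scope of construction/development work includes: " ++ value
    else if PySem.Str.isIn "state" ll = true then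
      "This project is located in the state of " ++ value
    else if PySem.Str.isIn "city" ll = true then
      "Project location/implementation site is in " ++ value
    else
      "Tender specification for " ++ PySem.Str.lower label ++ ": " ++ value

-- ===== PORT B =====
-- template pieces: a literal string, the lowered label, or the value
inductive CsPiece
  | lit : String → CsPiece
  | lab : CsPiece
  | val : CsPiece
deriving DecidableEq, Repr

def csKeywords : List String :=
  ["amount", "value", "cost", "emd", "contract", "document", "fee", "tender",
   "date", "deadline", "due", "authority", "organization", "experience",
   "financial", "requirement", "technical", "type", "name", "title", "project",
   "construction", "development", "work", "state", "city"]

-- the set of keywords occurring in the lowered label (PySem.Set as distinct list; csKeywords has no duplicates)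
def csPresent (ll : String) : List String := csKeywords.filter (fun w => PySem.Str.isIn w ll)

-- flat rule table: (all-of groups, each group any-of; none-of; template pieces)
def csRules : List (List (List String) × List String × List CsPiece) :=
  [ ([["amount", "value", "cost"], ["emd"]], [],
     [.lit "Earnest Money Deposit (EMD) required for participating in this tender is ", .val]),
    ([["amount", "value", "cost"], ["contract"]], [],
     [.lit "Total contract value for the execution of this project is ", .val]),
    ([["amount", "value", "cost"], ["document", "fee"]], [],
     [.lit "Document fees that must be paid to obtain tender documents amount to ", .val]),
    ([["amount", "value", "cost"], ["tender"]], [],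
     [.lit "Total estimated tender value for this construction/procurement project is ", .val]),
    ([["amount", "value", "cost"]], [],
     [.lit "The ", .lab, .lit " specified in the tender documents is ", .val]),
    ([["emd"]], ["amount"],
     [.lit "Earnest Money Deposit (EMD) requirement for this tender is ", .val]),
    ([["document"], ["fee"]], [],
     [.lit "Fees required for purchasing tender documents and specifications amount to ", .val]),
    ([["date", "deadline"], ["due"]], [],
     [.lit "Final deadline for submission of completed tender bids is ", .val]),
    ([["date", "deadline"]], [],
     [.lit "Important ", .lab, .lit " specified in the tender schedule is ", .val]),
    ([["authority", "organization"]], [],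
     [.lit "The ", .lab, .lit " responsible for issuing and managing this tender is ", .val]),
    ([["experience"]], [],
     [.lit "Experience qualification required from bidders: ", .val]),
    ([["financial"], ["requirement"]], [],
     [.lit "Financial eligibility criteria that bidders must meet: ", .val]),
    ([["technical"], ["requirement"]], [],
     [.lit "Technical qualification and capability requirements: ", .val]),
    ([["type"]], [],
     [.lit "This procurement is categorized as a ", .val, .lit " type project"]),
    ([["name", "title"], ["project"]], [],
     [.lit "Official project name/title: ", .val]),
    ([["name", "title"]], [],
     [.lit "The project is officially named: ", .val]),
    ([["construction", "development", "work"]], [],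
     [.lit "Scope of construction/development work includes: ", .val]),
    ([["state"]], [],
     [.lit "This project is located in the state of ", .val]),
    ([["city"]], [],
     [.lit "Project location/implementation site is in ", .val]) ]

def csFallback : List CsPiece := [.lit "Tender specification for ", .lab, .lit ": ", .val]

def csRender (ll value : String) : List CsPiece → String
  | [] => ""
  | .lit s :: rest => s ++ csRender ll value rest
  | .lab :: rest => ll ++ csRender ll value rest
  | .val :: rest => value ++ csRender ll value rest

def csMatch (present : List String) (groups : List (List String)) (noneOf : List String) : Bool :=
  groups.all (fun g => g.any (fun w => present.contains w)) && noneOf.all (fun w => !present.contains w)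

def csScan (present : List String) (ll value : String) :
    List (List (List String) × List String × List CsPiece) → String
  | [] => csRender ll value csFallback
  | (groups, noneOf, template) :: rest =>
    if csMatch present groups noneOf = true then csRender ll value template
    else csScan present ll value rest

def create_contextual_sentence_py_alt (label : String) (value : String) : String :=
  if (decide (PySem.Str.len value > 50) && ".!?".toList.any (fun c => value.toList.contains c)) = true then value
  else if PySem.Str.len value > 100 then value
  else
    let vl := PySem.Str.lower value
    if (PySem.Str.isIn "refer" vl && PySem.Str.isIn "document" vl) = true then
      "For " ++ PySem.Str.lower label ++ ", bidders must refer to the tender document for specific details and requirements"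
    else
      let ll := PySem.Str.lower label
      csScan (csPresent ll) ll value csRules

-- ===== PRECONDITION & SPEC =====
def Spec_create_contextual_sentence_py (label : String) (value : String) (out : String) : Prop := out = create_contextual_sentence_py_alt label value
instance (label : String) (value : String) (out : String) : Decidable (Spec_create_contextual_sentence_py label value out) := by unfold Spec_create_contextual_sentence_py; infer_instance

-- ===== CLAIM =====
def Claim_equal_create_contextual_sentence_py : Prop := ∀ (label : String) (value : String), Dom_create_contextual_sentence_py label value → Spec_create_contextual_sentence_py label value (create_contextual_sentence_py label value)

-- ===== LEMMAS AND PROOFS =====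
theorem csPresent_contains (ll : String) (w : String) (h : w ∈ csKeywords) :
    (csPresent ll).contains w = PySem.Str.isIn w ll := by
  have h2 : (csPresent ll).contains w = true ↔ PySem.Str.isIn w ll = true := by
    simp only [csPresent, List.contains_iff_mem, List.mem_filter]
    exact ⟨fun a => a.2, fun a => ⟨h, a⟩⟩
  cases hc : (csPresent ll).contains w <;> cases hp : PySem.Str.isIn w ll <;> simp_all

theorem cp_amount (ll : String) : (csPresent ll).contains "amount" = PySem.Str.isIn "amount" ll := csPresent_contains ll _ (by decide)
theorem cp_value (ll : String) : (csPresent ll).contains "value" = PySem.Str.isIn "value" ll := csPresent_contains ll _ (by decide)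
theorem cp_cost (ll : String) : (csPresent ll).contains "cost" = PySem.Str.isIn "cost" ll := csPresent_contains ll _ (by decide)
theorem cp_emd (ll : String) : (csPresent ll).contains "emd" = PySem.Str.isIn "emd" ll := csPresent_contains ll _ (by decide)
theorem cp_contract (ll : String) : (csPresent ll).contains "contract" = PySem.Str.isIn "contract" ll := csPresent_contains ll _ (by decide)
theorem cp_document (ll : String) : (csPresent ll).contains "document" = PySem.Str.isIn "document" ll := csPresent_contains ll _ (by decide)
theorem cp_fee (ll : String) : (csPresent ll).contains "fee" = PySem.Str.isIn "fee" ll := csPresent_contains ll _ (by decide)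
theorem cp_tender (ll : String) : (csPresent ll).contains "tender" = PySem.Str.isIn "tender" ll := csPresent_contains ll _ (by decide)
theorem cp_date (ll : String) : (csPresent ll).contains "date" = PySem.Str.isIn "date" ll := csPresent_contains ll _ (by decide)
theorem cp_deadline (ll : String) : (csPresent ll).contains "deadline" = PySem.Str.isIn "deadline" ll := csPresent_contains ll _ (by decide)
theorem cp_due (ll : String) : (csPresent ll).contains "due" = PySem.Str.isIn "due" ll := csPresent_contains ll _ (by decide)
theorem cp_authority (ll : String) : (csPresent ll).contains "authority" = PySem.Str.isIn "authority" ll := csPresent_contains ll _ (by decide)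
theorem cp_organization (ll : String) : (csPresent ll).contains "organization" = PySem.Str.isIn "organization" ll := csPresent_contains ll _ (by decide)
theorem cp_experience (ll : String) : (csPresent ll).contains "experience" = PySem.Str.isIn "experience" ll := csPresent_contains ll _ (by decide)
theorem cp_financial (ll : String) : (csPresent ll).contains "financial" = PySem.Str.isIn "financial" ll := csPresent_contains ll _ (by decide)
theorem cp_requirement (ll : String) : (csPresent ll).contains "requirement" = PySem.Str.isIn "requirement" ll := csPresent_contains ll _ (by decide)
theorem cp_technical (ll : String) : (csPresent ll).contains "technical" = PySem.Str.isIn "technical" ll := csPresent_contains ll _ (by decide)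
theorem cp_type (ll : String) : (csPresent ll).contains "type" = PySem.Str.isIn "type" ll := csPresent_contains ll _ (by decide)
theorem cp_name (ll : String) : (csPresent ll).contains "name" = PySem.Str.isIn "name" ll := csPresent_contains ll _ (by decide)
theorem cp_title (ll : String) : (csPresent ll).contains "title" = PySem.Str.isIn "title" ll := csPresent_contains ll _ (by decide)
theorem cp_project (ll : String) : (csPresent ll).contains "project" = PySem.Str.isIn "project" ll := csPresent_contains ll _ (by decide)
theorem cp_construction (ll : String) : (csPresent ll).contains "construction" = PySem.Str.isIn "construction" ll := csPresent_contains ll _ (by decide)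
theorem cp_development (ll : String) : (csPresent ll).contains "development" = PySem.Str.isIn "development" ll := csPresent_contains ll _ (by decide)
theorem cp_work (ll : String) : (csPresent ll).contains "work" = PySem.Str.isIn "work" ll := csPresent_contains ll _ (by decide)
theorem cp_state (ll : String) : (csPresent ll).contains "state" = PySem.Str.isIn "state" ll := csPresent_contains ll _ (by decide)
theorem cp_city (ll : String) : (csPresent ll).contains "city" = PySem.Str.isIn "city" ll := csPresent_contains ll _ (by decide)

-- ===== VERDICT =====
set_option maxHeartbeats 4000000 in
theorem create_contextual_sentence_py_spec : Claim_equal_create_contextual_sentence_py := by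
  intro label value _
  unfold Spec_create_contextual_sentence_py create_contextual_sentence_py create_contextual_sentence_py_alt
  simp only [csScan, csRules, csMatch, csRender, csFallback, List.all_cons, List.all_nil,
    List.any_cons, List.any_nil, Bool.and_true, Bool.or_false, Bool.true_and,
    String.append_empty, String.append_assoc, Bool.or_assoc, cp_amount, cp_value, cp_cost, cp_emd, cp_contract, cp_document, cp_fee, cp_tender, cp_date, cp_deadline, cp_due, cp_authority, cp_organization, cp_experience, cp_financial, cp_requirement, cp_technical, cp_type, cp_name, cp_title, cp_project, cp_construction, cp_development, cp_work, cp_state, cp_city]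
  by_cases hg1 : (decide (PySem.Str.len value > 50) && ".!?".toList.any (fun c => value.toList.contains c)) = true
  ·
    simp only [hg1, eq_self_iff_true, Bool.false_eq_true, if_true, if_false, Bool.true_and, Bool.false_and, Bool.and_true, Bool.and_false, Bool.or_true, Bool.true_or, Bool.or_false, Bool.false_or, Bool.not_true, Bool.not_false]
  ·
    by_cases hg2 : PySem.Str.len value > 100
    ·
      simp only [hg1, hg2, eq_self_iff_true, Bool.false_eq_true, if_true, if_false, Bool.true_and, Bool.false_and, Bool.and_true, Bool.and_false, Bool.or_true, Bool.true_or, Bool.or_false, Bool.false_or, Bool.not_true, Bool.not_false]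
    ·
      by_cases hg3 : (PySem.Str.isIn "refer" (PySem.Str.lower value) && PySem.Str.isIn "document" (PySem.Str.lower value)) = true
      ·
        simp only [hg1, hg2, hg3, eq_self_iff_true, Bool.false_eq_true, if_true, if_false, Bool.true_and, Bool.false_and, Bool.and_true, Bool.and_false, Bool.or_true, Bool.true_or, Bool.or_false, Bool.false_or, Bool.not_true, Bool.not_false]
      ·
        simp only [hg1, hg2, hg3, eq_self_iff_true, Bool.false_eq_true, if_true, if_false, Bool.true_and, Bool.false_and, Bool.and_true, Bool.and_false, Bool.or_true, Bool.true_or, Bool.or_false, Bool.false_or, Bool.not_true, Bool.not_false]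
        cases c1 : (PySem.Str.isIn "amount" (PySem.Str.lower label) || (PySem.Str.isIn "value" (PySem.Str.lower label) || PySem.Str.isIn "cost" (PySem.Str.lower label)))
        ·
          simp only [c1, eq_self_iff_true, Bool.false_eq_true, if_true, if_false, Bool.true_and, Bool.false_and, Bool.and_true, Bool.and_false, Bool.or_true, Bool.true_or, Bool.or_false, Bool.false_or, Bool.not_true, Bool.not_false]
          cases c2 : (PySem.Str.isIn "emd" (PySem.Str.lower label) && !PySem.Str.isIn "amount" (PySem.Str.lower label))
          ·
            simp only [c2, eq_self_iff_true, Bool.false_eq_true, if_true, if_false, Bool.true_and, Bool.false_and, Bool.and_true, Bool.and_false, Bool.or_true, Bool.true_or, Bool.or_false, Bool.false_or, Bool.not_true, Bool.not_false]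
            cases c3 : (PySem.Str.isIn "document" (PySem.Str.lower label) && PySem.Str.isIn "fee" (PySem.Str.lower label))
            ·
              simp only [c3, eq_self_iff_true, Bool.false_eq_true, if_true, if_false, Bool.true_and, Bool.false_and, Bool.and_true, Bool.and_false, Bool.or_true, Bool.true_or, Bool.or_false, Bool.false_or, Bool.not_true, Bool.not_false]
              cases c4 : (PySem.Str.isIn "date" (PySem.Str.lower label) || PySem.Str.isIn "deadline" (PySem.Str.lower label))
              ·
                simp only [c4, eq_self_iff_true, Bool.false_eq_true, if_true, if_false, Bool.true_and, Bool.false_and, Bool.and_true, Bool.and_false, Bool.or_true, Bool.true_or, Bool.or_false, Bool.false_or, Bool.not_true, Bool.not_false]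
                cases c5 : (PySem.Str.isIn "authority" (PySem.Str.lower label) || PySem.Str.isIn "organization" (PySem.Str.lower label))
                ·
                  simp only [c5, eq_self_iff_true, Bool.false_eq_true, if_true, if_false, Bool.true_and, Bool.false_and, Bool.and_true, Bool.and_false, Bool.or_true, Bool.true_or, Bool.or_false, Bool.false_or, Bool.not_true, Bool.not_false]
                  cases c6 : PySem.Str.isIn "experience" (PySem.Str.lower label)
                  ·
                    simp only [c6, eq_self_iff_true, Bool.false_eq_true, if_true, if_false, Bool.true_and, Bool.false_and, Bool.and_true, Bool.and_false, Bool.or_true, Bool.true_or, Bool.or_false, Bool.false_or, Bool.not_true, Bool.not_false]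
                    cases c7 : (PySem.Str.isIn "financial" (PySem.Str.lower label) && PySem.Str.isIn "requirement" (PySem.Str.lower label))
                    ·
                      simp only [c7, eq_self_iff_true, Bool.false_eq_true, if_true, if_false, Bool.true_and, Bool.false_and, Bool.and_true, Bool.and_false, Bool.or_true, Bool.true_or, Bool.or_false, Bool.false_or, Bool.not_true, Bool.not_false]
                      cases c8 : (PySem.Str.isIn "technical" (PySem.Str.lower label) && PySem.Str.isIn "requirement" (PySem.Str.lower label))
                      ·
                        simp only [c8, eq_self_iff_true, Bool.false_eq_true, if_true, if_false, Bool.true_and, Bool.false_and, Bool.and_true, Bool.and_false, Bool.or_true, Bool.true_or, Bool.or_false, Bool.false_or, Bool.not_true, Bool.not_false]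
                        cases c9 : PySem.Str.isIn "type" (PySem.Str.lower label)
                        ·
                          simp only [c9, eq_self_iff_true, Bool.false_eq_true, if_true, if_false, Bool.true_and, Bool.false_and, Bool.and_true, Bool.and_false, Bool.or_true, Bool.true_or, Bool.or_false, Bool.false_or, Bool.not_true, Bool.not_false]
                          cases c10 : (PySem.Str.isIn "name" (PySem.Str.lower label) || PySem.Str.isIn "title" (PySem.Str.lower label))
                          ·
                            simp only [c10, eq_self_iff_true, Bool.false_eq_true, if_true, if_false, Bool.true_and, Bool.false_and, Bool.and_true, Bool.and_false, Bool.or_true, Bool.true_or, Bool.or_false, Bool.false_or, Bool.not_true, Bool.not_false]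
                          ·
                            simp only [c10, eq_self_iff_true, Bool.false_eq_true, if_true, if_false, Bool.true_and, Bool.false_and, Bool.and_true, Bool.and_false, Bool.or_true, Bool.true_or, Bool.or_false, Bool.false_or, Bool.not_true, Bool.not_false]
                        ·
                          simp only [c9, eq_self_iff_true, Bool.false_eq_true, if_true, if_false, Bool.true_and, Bool.false_and, Bool.and_true, Bool.and_false, Bool.or_true, Bool.true_or, Bool.or_false, Bool.false_or, Bool.not_true, Bool.not_false]
                      ·
                        simp only [c8, eq_self_iff_true, Bool.false_eq_true, if_true, if_false, Bool.true_and, Bool.false_and, Bool.and_true, Bool.and_false, Bool.or_true, Bool.true_or, Bool.or_false, Bool.false_or, Bool.not_true, Bool.not_false]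
                    ·
                      simp only [c7, eq_self_iff_true, Bool.false_eq_true, if_true, if_false, Bool.true_and, Bool.false_and, Bool.and_true, Bool.and_false, Bool.or_true, Bool.true_or, Bool.or_false, Bool.false_or, Bool.not_true, Bool.not_false]
                  ·
                    simp only [c6, eq_self_iff_true, Bool.false_eq_true, if_true, if_false, Bool.true_and, Bool.false_and, Bool.and_true, Bool.and_false, Bool.or_true, Bool.true_or, Bool.or_false, Bool.false_or, Bool.not_true, Bool.not_false]
                ·
                  simp only [c5, eq_self_iff_true, Bool.false_eq_true, if_true, if_false, Bool.true_and, Bool.false_and, Bool.and_true, Bool.and_false, Bool.or_true, Bool.true_or, Bool.or_false, Bool.false_or, Bool.not_true, Bool.not_false]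
              ·
                simp only [c4, eq_self_iff_true, Bool.false_eq_true, if_true, if_false, Bool.true_and, Bool.false_and, Bool.and_true, Bool.and_false, Bool.or_true, Bool.true_or, Bool.or_false, Bool.false_or, Bool.not_true, Bool.not_false]
            ·
              simp only [c3, eq_self_iff_true, Bool.false_eq_true, if_true, if_false, Bool.true_and, Bool.false_and, Bool.and_true, Bool.and_false, Bool.or_true, Bool.true_or, Bool.or_false, Bool.false_or, Bool.not_true, Bool.not_false]
          ·
            simp only [c2, eq_self_iff_true, Bool.false_eq_true, if_true, if_false, Bool.true_and, Bool.false_and, Bool.and_true, Bool.and_false, Bool.or_true, Bool.true_or, Bool.or_false, Bool.false_or, Bool.not_true, Bool.not_false]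
        ·
          simp only [c1, eq_self_iff_true, Bool.false_eq_true, if_true, if_false, Bool.true_and, Bool.false_and, Bool.and_true, Bool.and_false, Bool.or_true, Bool.true_or, Bool.or_false, Bool.false_or, Bool.not_true, Bool.not_false]
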